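-- pv_equiv track=rewrite | github.com/wasif23ahad/ai-rag-chatbot-pdf | backend/app/core/query_expansion.py | _reformulate_question
-- ===== SOURCE A (Python) =====
-- def _reformulate_question(query: str) -> str:
--     """Reformulate question structure."""
--     query_lower = query.lower().strip()
--
--     # What is/are X → How does X work / Tell me about X
--     if query_lower.startswith("what is "):
--         return "Tell me about " + query[8:]
--     if query_lower.startswith("what are "):
--         return "Explain the " + query[9:]
--
--     # How to X → X implementation / How do I X
--     if query_lower.startswith("how to "):
--         return "How do I " + query[7:]
--
--     # Remove leading question words for keyword search
--     for prefix in ["what is ", "what are ", "how does ", "explain ", "describe "]: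
--         if query_lower.startswith(prefix):
--             return query[len(prefix) :].strip().capitalize()
--
--     return ""
-- ===== SOURCE B (Python) =====
-- # Different algorithm: the rewrite rules are compiled once into a character
-- # trie, and the query is matched by a single char-by-char walk of the trie
-- # (no startswith calls); slicing stays on the raw query, preserving A's
-- # leading-whitespace offset behaviour.
--
-- _RULES = [
--     ("what is ", "Tell me about "),
--     ("what are ", "Explain the "),
--     ("how to ", "How do I "),
--     ("how does ", None),
--     ("explain ", None),
--     ("describe ", None),
-- ]
--
-- _TRIE = {}
-- for _prefix, _repl in _RULES:
--     _node = _TRIE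
--     for _ch in _prefix:
--         _node = _node.setdefault(_ch, {})
--     _node[""] = _repl  # terminal: replacement to prepend, or None = strip+capitalize
--
--
-- def _reformulate_question(query: str) -> str:
--     node = _TRIE
--     i = 0
--     for ch in query.lower().strip():
--         node = node.get(ch)
--         if node is None:
--             return ""
--         i += 1
--         if "" in node:
--             repl = node[""]
--             rest = query[i:]
--             if repl is not None:
--                 return repl + rest
--             return rest.strip().capitalize()
--     return ""
-- ===== Notes on version B (the rewrite author's own statement) =====
-- stated objective: alternative
-- what changed: Replaces A's chain of startswith tests (plus a second prefix loop with dead entries) by a prefix trie compiled once from the rule table and matched by a single character-by-character trie walk over the lowered/stripped query.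
import Mathlib
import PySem

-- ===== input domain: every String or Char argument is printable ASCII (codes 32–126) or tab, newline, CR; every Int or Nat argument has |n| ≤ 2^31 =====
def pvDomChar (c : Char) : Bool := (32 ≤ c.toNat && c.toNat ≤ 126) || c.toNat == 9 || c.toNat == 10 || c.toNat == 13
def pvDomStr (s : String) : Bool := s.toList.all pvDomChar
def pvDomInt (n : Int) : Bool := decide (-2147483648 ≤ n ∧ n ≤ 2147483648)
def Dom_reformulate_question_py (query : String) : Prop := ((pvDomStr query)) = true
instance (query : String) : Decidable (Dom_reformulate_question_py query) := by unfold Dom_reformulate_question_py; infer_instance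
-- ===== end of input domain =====

-- B compiles the rewrite rules into a character trie once and matches the query by a
-- single char-by-char trie walk instead of A's chain of startswith tests; same value.

-- ===== PORT A =====
-- Python str.capitalize(), exact on the ASCII domain (first char uppercased, rest lowered).
def pyCapitalize (s : String) : String :=
  match s.toList with
  | [] => ""
  | c :: rest => String.ofList (PySem.Chars.upperChar c :: PySem.Chars.lower rest)

-- A's 'for prefix in [...]' loop with early return.
def reformAForLoop (query query_lower : String) : List String → String
  | [] => ""
  | p :: ps =>
    if PySem.Str.startswith query_lower p then
      pyCapitalize (PySem.Str.strip (PySem.Str.slice query (some (PySem.Str.len p)) none))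
    else reformAForLoop query query_lower ps

-- A's branch chain, after the 'query_lower = …' binding.
def reformAChain (query query_lower : String) : String :=
  if PySem.Str.startswith query_lower "what is " then
    "Tell me about " ++ PySem.Str.slice query (some 8) none
  else if PySem.Str.startswith query_lower "what are " then
    "Explain the " ++ PySem.Str.slice query (some 9) none
  else if PySem.Str.startswith query_lower "how to " then
    "How do I " ++ PySem.Str.slice query (some 7) none
  else
    reformAForLoop query query_lower
      ["what is ", "what are ", "how does ", "explain ", "describe "]

def reformulate_question_py (query : String) : String :=
  reformAChain query (PySem.Str.strip (PySem.Str.lower query))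

-- ===== PORT B =====
-- Source B's dict-of-dicts trie. A node is 'node action children'; the children dict is the
-- association list built from 'cnil' (empty dict) and 'ccons key subtrie rest' (one entry).
-- The action ('""' key) is 'some repl' at a terminal: 'repl = some s' prepends s,
-- 'repl = none' strips+capitalizes. (One inductive instead of a mutual pair; the
-- constructors not matching a position are dead plumbing mapped to "" / no child.)
inductive PTrie where
  | cnil : PTrie
  | ccons : Char → PTrie → PTrie → PTrie
  | node : Option (Option String) → PTrie → PTrie
  deriving DecidableEq

-- node.get(ch) on the children association list
def childGet : PTrie → Char → Option PTrie
  | PTrie.ccons c t r, ch => if c == ch then some t else childGet r ch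
  | _, _ => none

-- setdefault's chain of fresh {} nodes for a not-yet-present prefix tail
def trieOfPath : List Char → Option String → PTrie
  | [], repl => PTrie.node (some repl) PTrie.cnil
  | c :: cs, repl => PTrie.node none (PTrie.ccons c (trieOfPath cs repl) PTrie.cnil)

mutual
-- trie-building loop body: descend with setdefault, mark the terminal at the end
def trieInsert : PTrie → List Char → Option String → PTrie
  | PTrie.node _ ch, [], repl => PTrie.node (some repl) ch
  | PTrie.node a ch, c :: cs, repl => PTrie.node a (childInsert ch c cs repl)
  | t, _, _ => t
termination_by structural t => t
def childInsert : PTrie → Char → List Char → Option String → PTrie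
  | PTrie.ccons c' t r, c, cs, repl =>
    if c' == c then PTrie.ccons c' (trieInsert t cs repl) r
    else PTrie.ccons c' t (childInsert r c cs repl)
  | _, c, cs, repl => PTrie.ccons c (trieOfPath cs repl) PTrie.cnil
termination_by structural ch => ch
end

def pvRulesB : List (String × Option String) :=
  [("what is ", some "Tell me about "), ("what are ", some "Explain the "),
   ("how to ", some "How do I "), ("how does ", none), ("explain ", none), ("describe ", none)]

def pvTrie : PTrie :=
  pvRulesB.foldl (fun t pr => trieInsert t pr.1.toList pr.2) (PTrie.node none PTrie.cnil)

-- the 'for ch in ql' walk: i counts consumed chars, slices the raw query at i after i += 1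
def trieWalk (query : String) : Nat → List Char → PTrie → String
  | _, [], _ => ""
  | i, c :: rest, PTrie.node _ ch =>
    (match childGet ch c with
     | none => ""
     | some (PTrie.node act ch') =>
       (match act with
        | some repl =>
          (match repl with
           | some r => r ++ PySem.Str.slice query (some ((i + 1 : Nat) : Int)) none
           | none => pyCapitalize (PySem.Str.strip (PySem.Str.slice query (some ((i + 1 : Nat) : Int)) none)))
        | none => trieWalk query (i + 1) rest (PTrie.node act ch'))
     | some _ => "")
  | _, _ :: _, _ => ""

def reformulate_question_py_alt (query : String) : String :=
  trieWalk query 0 (PySem.Str.strip (PySem.Str.lower query)).toList pvTrie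

-- ===== PRECONDITION & SPEC =====
def Spec_reformulate_question_py (query : String) (out : String) : Prop := out = reformulate_question_py_alt query
instance (query : String) (out : String) : Decidable (Spec_reformulate_question_py query out) := by unfold Spec_reformulate_question_py; infer_instance

-- ===== CLAIM (what is proved, stated in full; the proofs are below) =====
def Claim_equal_reformulate_question_py : Prop := ∀ (query : String), Dom_reformulate_question_py query → Spec_reformulate_question_py query (reformulate_question_py query)

-- ===== LEMMAS AND PROOFS =====

-- the literal value of the built trie
def pvTrieLit : PTrie :=
  (PTrie.node none (PTrie.ccons 'w' (PTrie.node none (PTrie.ccons 'h' (PTrie.node none (PTrie.ccons 'a' (PTrie.node none (PTrie.ccons 't' (PTrie.node none (PTrie.ccons ' ' (PTrie.node none (PTrie.ccons 'i' (PTrie.node none (PTrie.ccons 's' (PTrie.node none (PTrie.ccons ' ' (PTrie.node (some (some "Tell me about ")) PTrie.cnil) PTrie.cnil)) PTrie.cnil)) (PTrie.ccons 'a' (PTrie.node none (PTrie.ccons 'r' (PTrie.node none (PTrie.ccons 'e' (PTrie.node none (PTrie.ccons ' ' (PTrie.node (some (some "Explain the ")) PTrie.cnil) PTrie.cnil)) PTrie.cnil))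 PTrie.cnil)) PTrie.cnil))) PTrie.cnil)) PTrie.cnil)) PTrie.cnil)) PTrie.cnil)) (PTrie.ccons 'h' (PTrie.node none (PTrie.ccons 'o' (PTrie.node none (PTrie.ccons 'w' (PTrie.node none (PTrie.ccons ' ' (PTrie.node none (PTrie.ccons 't' (PTrie.node none (PTrie.ccons 'o' (PTrie.node none (PTrie.ccons ' ' (PTrie.node (some (some "How do I ")) PTrie.cnil) PTrie.cnil)) PTrie.cnil)) (PTrie.ccons 'd' (PTrie.node none (PTrie.ccons 'o' (PTrie.node none (PTrie.ccons 'e' (PTrie.node none (PTrie.ccons 's' (PTrie.node none (PTrie.ccons ' ' (PTrie.node (some (none)) PTrie.cnil) PTrie.cnil)) PTrie.cnil)) PTrie.cnil)) PTrie.cnil)) PTrie.cnil))) PTrie.cnil)) PTrie.cnil)) PTrie.cnil)) (PTrie.ccons 'e' (PTrie.node none (PTrie.ccons 'x' (PTrie.node none (PTrie.ccons 'p' (PTrie.node none (PTrie.ccons 'l' (PTrie.node none (PTrie.ccons 'a' (PTrie.node none (PTrie.ccons 'i' (PTrie.node none (PTrie.ccons 'n' (PTrie.node none (PTrie.ccons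 ' ' (PTrie.node (some (none)) PTrie.cnil) PTrie.cnil)) PTrie.cnil)) PTrie.cnil)) PTrie.cnil)) PTrie.cnil)) PTrie.cnil)) PTrie.cnil)) (PTrie.ccons 'd' (PTrie.node none (PTrie.ccons 'e' (PTrie.node none (PTrie.ccons 's' (PTrie.node none (PTrie.ccons 'c' (PTrie.node none (PTrie.ccons 'r' (PTrie.node none (PTrie.ccons 'i' (PTrie.node none (PTrie.ccons 'b' (PTrie.node none (PTrie.ccons 'e' (PTrie.node none (PTrie.ccons ' ' (PTrie.node (some (none)) PTrie.cnil) PTrie.cnil)) PTrie.cnil)) PTrie.cnil)) PTrie.cnil)) PTrie.cnil)) PTrie.cnil)) PTrie.cnil)) PTrie.cnil)) PTrie.cnil)))))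

lemma tl1 : "what is ".toList = ['w', 'h', 'a', 't', ' ', 'i', 's', ' '] := by decide
lemma tl2 : "what are ".toList = ['w', 'h', 'a', 't', ' ', 'a', 'r', 'e', ' '] := by decide
lemma tl3 : "how to ".toList = ['h', 'o', 'w', ' ', 't', 'o', ' '] := by decide
lemma tl4 : "how does ".toList = ['h', 'o', 'w', ' ', 'd', 'o', 'e', 's', ' '] := by decide
lemma tl5 : "explain ".toList = ['e', 'x', 'p', 'l', 'a', 'i', 'n', ' '] := by decide
lemma tl6 : "describe ".toList = ['d', 'e', 's', 'c', 'r', 'i', 'b', 'e', ' '] := by decide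

lemma pvTrie_eq : pvTrie = pvTrieLit := by
  simp only [pvTrie, pvRulesB, List.foldl, tl1, tl2, tl3, tl4, tl5, tl6]
  simp [trieInsert, childInsert, trieOfPath, pvTrieLit]

-- all (prefix, action) pairs stored in a trie
def triePaths : PTrie → List (List Char × Option String)
  | PTrie.cnil => []
  | PTrie.ccons c t r => (triePaths t).map (fun pr => (c :: pr.1, pr.2)) ++ triePaths r
  | PTrie.node a ch =>
    (match a with | some r => [(([] : List Char), r)] | none => []) ++ triePaths ch

lemma paths_pvTrie : triePaths pvTrie =
    [(['w', 'h', 'a', 't', ' ', 'i', 's', ' '], some "Tell me about "), (['w', 'h', 'a', 't', ' ', 'a', 'r', 'e', ' '], some "Explain the "), (['h', 'o', 'w', ' ', 't', 'o', ' '], some "How do I "), (['h', 'o', 'w', ' ', 'd', 'o', 'e', 's', ' '], none), (['e', 'x', 'p', 'l', 'a', 'i', 'n', ' '], none), (['d', 'e', 's', 'c', 'r', 'i', 'b', 'e', ' '], none)] := by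
  rw [pvTrie_eq]
  simp [pvTrieLit, triePaths]

lemma childGet_paths {ch : PTrie} {c : Char} {t : PTrie} (hg : childGet ch c = some t)
    {p : List Char} {r : Option String} (hp : (p, r) ∈ triePaths t) :
    (c :: p, r) ∈ triePaths ch := by
  induction ch with
  | cnil => simp [childGet] at hg
  | ccons c' t' rest iht ihr =>
    rw [childGet] at hg
    by_cases hc : c' == c
    · rw [if_pos hc] at hg
      cases hg
      simp only [triePaths, List.mem_append]
      exact Or.inl (List.mem_map.mpr ⟨(p, r), hp, by simp [eq_of_beq hc]⟩)
    · rw [if_neg hc] at hg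
      simp only [triePaths, List.mem_append]
      exact Or.inr (ihr hg)
  | node a ch' ih => simp [childGet] at hg

lemma walk_empty_of_no_match (query : String) :
    ∀ (l : List Char) (T : PTrie) (i : Nat),
      (∀ p r, (p, r) ∈ triePaths T → p ≠ [] → ¬ p <+: l) → trieWalk query i l T = "" := by
  intro l
  induction l with
  | nil => intro T i _; rfl
  | cons c l ih =>
    intro T i h
    cases T with
    | cnil => rfl
    | ccons _ _ _ => rfl
    | node a ch =>
      rw [trieWalk]
      cases hg : childGet ch c with
      | none => rfl
      | some t =>
        cases t with
        | cnil => rfl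
        | ccons _ _ _ => rfl
        | node act ch' =>
          cases act with
          | some repl =>
            exfalso
            refine h [c] repl ?_ (by simp) ⟨l, rfl⟩
            have h0 : (([] : List Char), repl) ∈ triePaths (PTrie.node (some repl) ch') := by
              simp [triePaths]
            have h1 := childGet_paths hg h0
            simp only [triePaths, List.mem_append]
            exact Or.inr h1
          | none =>
            apply ih (PTrie.node none ch') (i + 1)
            intro p r hp hne
            have hmem : (c :: p, r) ∈ triePaths (PTrie.node a ch) := by
              simp only [triePaths, List.mem_append]
              exact Or.inr (childGet_paths hg hp)
            intro hpre
            exact h (c :: p) r hmem (by simp) (by simpa [List.cons_prefix_cons] using hpre)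

lemma walk_what_is (query : String) (tail : List Char) :
    trieWalk query 0 (['w', 'h', 'a', 't', ' ', 'i', 's', ' '] ++ tail) pvTrie = "Tell me about " ++ PySem.Str.slice query (some 8) none := by
  rw [pvTrie_eq]; simp [trieWalk, childGet, pvTrieLit]

lemma walk_what_are (query : String) (tail : List Char) :
    trieWalk query 0 (['w', 'h', 'a', 't', ' ', 'a', 'r', 'e', ' '] ++ tail) pvTrie = "Explain the " ++ PySem.Str.slice query (some 9) none := by
  rw [pvTrie_eq]; simp [trieWalk, childGet, pvTrieLit]

lemma walk_how_to (query : String) (tail : List Char) :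
    trieWalk query 0 (['h', 'o', 'w', ' ', 't', 'o', ' '] ++ tail) pvTrie = "How do I " ++ PySem.Str.slice query (some 7) none := by
  rw [pvTrie_eq]; simp [trieWalk, childGet, pvTrieLit]

lemma walk_how_does (query : String) (tail : List Char) :
    trieWalk query 0 (['h', 'o', 'w', ' ', 'd', 'o', 'e', 's', ' '] ++ tail) pvTrie = pyCapitalize (PySem.Str.strip (PySem.Str.slice query (some 9) none)) := by
  rw [pvTrie_eq]; simp [trieWalk, childGet, pvTrieLit]

lemma walk_explain (query : String) (tail : List Char) :
    trieWalk query 0 (['e', 'x', 'p', 'l', 'a', 'i', 'n', ' '] ++ tail) pvTrie = pyCapitalize (PySem.Str.strip (PySem.Str.slice query (some 8) none)) := by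
  rw [pvTrie_eq]; simp [trieWalk, childGet, pvTrieLit]

lemma walk_describe (query : String) (tail : List Char) :
    trieWalk query 0 (['d', 'e', 's', 'c', 'r', 'i', 'b', 'e', ' '] ++ tail) pvTrie = pyCapitalize (PySem.Str.strip (PySem.Str.slice query (some 9) none)) := by
  rw [pvTrie_eq]; simp [trieWalk, childGet, pvTrieLit]

lemma sw_true {ql : String} {p : List Char} (h : p <+: ql.toList) :
    PySem.Chars.startswith ql.toList p = true := (PySem.Chars.startswith_iff _ _).mpr h

lemma sw_false {ql : String} {p : List Char} (h : ¬ p <+: ql.toList) :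
    PySem.Chars.startswith ql.toList p = false :=
  Bool.eq_false_iff.mpr (fun hc => h ((PySem.Chars.startswith_iff _ _).mp hc))

lemma walk_eq_chain (query ql : String) :
    trieWalk query 0 ql.toList pvTrie = reformAChain query ql := by
  by_cases h1 : ['w', 'h', 'a', 't', ' ', 'i', 's', ' '] <+: ql.toList
  · obtain ⟨tail, htail⟩ := h1
    rw [← htail, walk_what_is]
    simp [reformAChain, sw_true ⟨tail, htail⟩]
  ·
    by_cases h2 : ['w', 'h', 'a', 't', ' ', 'a', 'r', 'e', ' '] <+: ql.toList
    · obtain ⟨tail, htail⟩ := h2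
      rw [← htail, walk_what_are]
      simp [reformAChain, sw_false h1, sw_true ⟨tail, htail⟩]
    ·
      by_cases h3 : ['h', 'o', 'w', ' ', 't', 'o', ' '] <+: ql.toList
      · obtain ⟨tail, htail⟩ := h3
        rw [← htail, walk_how_to]
        simp [reformAChain, sw_false h1, sw_false h2, sw_true ⟨tail, htail⟩]
      ·
        by_cases h4 : ['h', 'o', 'w', ' ', 'd', 'o', 'e', 's', ' '] <+: ql.toList
        · obtain ⟨tail, htail⟩ := h4
          rw [← htail, walk_how_does]
          simp [reformAChain, reformAForLoop, sw_false h1, sw_false h2, sw_false h3, sw_true ⟨tail, htail⟩]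
        ·
          by_cases h5 : ['e', 'x', 'p', 'l', 'a', 'i', 'n', ' '] <+: ql.toList
          · obtain ⟨tail, htail⟩ := h5
            rw [← htail, walk_explain]
            simp [reformAChain, reformAForLoop, sw_false h1, sw_false h2, sw_false h3, sw_false h4, sw_true ⟨tail, htail⟩]
          ·
            by_cases h6 : ['d', 'e', 's', 'c', 'r', 'i', 'b', 'e', ' '] <+: ql.toList
            · obtain ⟨tail, htail⟩ := h6
              rw [← htail, walk_describe]
              simp [reformAChain, reformAForLoop, sw_false h1, sw_false h2, sw_false h3, sw_false h4, sw_false h5, sw_true ⟨tail, htail⟩]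
            ·
              rw [walk_empty_of_no_match query ql.toList pvTrie 0 ?_]
              · simp [reformAChain, reformAForLoop, sw_false h1, sw_false h2, sw_false h3, sw_false h4, sw_false h5, sw_false h6]
              · rw [paths_pvTrie]
                intro p r hp _
                simp only [List.mem_cons, List.not_mem_nil, or_false, Prod.mk.injEq] at hp
                rcases hp with ⟨rfl, _⟩ | ⟨rfl, _⟩ | ⟨rfl, _⟩ | ⟨rfl, _⟩ | ⟨rfl, _⟩ | ⟨rfl, _⟩ <;> assumption

-- ===== VERDICT (by name: the statement is the Claim_ definition above) =====
theorem reformulate_question_py_spec : Claim_equal_reformulate_question_py := by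
  intro query _
  unfold Spec_reformulate_question_py reformulate_question_py reformulate_question_py_alt
  exact (walk_eq_chain query _).symm
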